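-- pv_equiv track=rewrite | github.com/devboy/requencer | hardware/boards/scripts/routing/autoroute.py | parse_drc_metrics
-- ===== SOURCE A (Python) =====
-- def parse_drc_metrics(report):
--     """Extract scoring metrics from a DRC JSON report.
--
--     Returns dict with drc_errors, drc_warnings, unconnected_count.
--     """
--     violations = report.get("violations", [])
--     unconnected = report.get("unconnected_items", [])
--     errors = sum(1 for v in violations if v.get("severity") == "error")
--     warnings = sum(1 for v in violations if v.get("severity") == "warning")
--     return {
--         "drc_errors": errors,
--         "drc_warnings": warnings,
--         "unconnected_count": len(unconnected),
--     }
-- ===== SOURCE B (Python) =====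
-- def parse_drc_metrics(report):
--     """Extract scoring metrics from a DRC JSON report.
--
--     One pass over violations building a severity frequency table,
--     then read the two buckets of interest.
--     """
--     counts = {}
--     for v in report.get("violations", []):
--         s = v.get("severity")
--         counts[s] = counts.get(s, 0) + 1
--     return {
--         "drc_errors": counts.get("error", 0),
--         "drc_warnings": counts.get("warning", 0),
--         "unconnected_count": len(report.get("unconnected_items", [])),
--     }
-- ===== Notes on version B (the rewrite author's own statement) =====
-- stated objective: idiomatic
-- what changed: B makes a single pass over violations building a severity frequency table (a dict tally) and then reads the 'error' and 'warning' buckets, instead of A's two separate generator-sum scans of the violations list.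
import Mathlib
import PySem

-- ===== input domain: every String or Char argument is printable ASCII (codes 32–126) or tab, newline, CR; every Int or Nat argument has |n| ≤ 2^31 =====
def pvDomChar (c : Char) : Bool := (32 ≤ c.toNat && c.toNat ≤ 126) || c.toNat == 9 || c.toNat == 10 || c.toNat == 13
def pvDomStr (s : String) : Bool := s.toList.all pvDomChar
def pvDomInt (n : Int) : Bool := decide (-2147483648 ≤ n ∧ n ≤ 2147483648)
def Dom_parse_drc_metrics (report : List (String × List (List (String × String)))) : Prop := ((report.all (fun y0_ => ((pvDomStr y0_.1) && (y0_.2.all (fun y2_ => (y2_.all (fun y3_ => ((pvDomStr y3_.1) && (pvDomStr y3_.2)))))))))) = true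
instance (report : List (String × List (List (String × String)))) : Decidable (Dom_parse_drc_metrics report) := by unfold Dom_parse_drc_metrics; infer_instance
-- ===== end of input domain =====

-- B builds a severity frequency table in one pass instead of A's two counting scans (idiomatic; return value only).

-- ===== PORT A =====
def parse_drc_metrics (report : List (String × List (List (String × String)))) : List (String × Int) :=
  let violations := (PySem.Dict.mk report).getD "violations" []
  let unconnected := (PySem.Dict.mk report).getD "unconnected_items" []
  let errors := violations.foldl
    (fun acc v => if (PySem.Dict.mk v).get? "severity" = some "error" then acc + 1 else acc) (0 : Int)
  let warnings := violations.foldl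
    (fun acc v => if (PySem.Dict.mk v).get? "severity" = some "warning" then acc + 1 else acc) (0 : Int)
  [("drc_errors", errors), ("drc_warnings", warnings), ("unconnected_count", (unconnected.length : Int))]

-- ===== PORT B =====
def parse_drc_metrics_alt (report : List (String × List (List (String × String)))) : List (String × Int) :=
  let counts : PySem.Dict (Option String) Int :=
    ((PySem.Dict.mk report).getD "violations" []).foldl
      (fun counts v =>
        let s := (PySem.Dict.mk v).get? "severity"
        counts.insert s (counts.getD s 0 + 1))
      PySem.Dict.empty
  [("drc_errors", counts.getD (some "error") 0),
   ("drc_warnings", counts.getD (some "warning") 0),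
   ("unconnected_count", (((PySem.Dict.mk report).getD "unconnected_items" []).length : Int))]

-- ===== PRECONDITION & SPEC =====
def Spec_parse_drc_metrics (report : List (String × List (List (String × String)))) (out : List (String × Int)) : Prop := out = parse_drc_metrics_alt report
instance (report : List (String × List (List (String × String)))) (out : List (String × Int)) : Decidable (Spec_parse_drc_metrics report out) := by unfold Spec_parse_drc_metrics; infer_instance

-- ===== CLAIM (what is proved, stated in full; the proofs are below) =====
def Claim_equal_parse_drc_metrics : Prop := ∀ (report : List (String × List (List (String × String)))), Dom_parse_drc_metrics report → Spec_parse_drc_metrics report (parse_drc_metrics report)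

-- ===== LEMMAS AND PROOFS =====

-- B's tally at key k equals the starting value plus the number of violations whose severity is k.
theorem tally_getD {γ : Type} (key : γ → Option String) (l : List γ)
    (d : PySem.Dict (Option String) Int) (k : Option String) :
    (l.foldl (fun d x => d.insert (key x) (d.getD (key x) 0 + 1)) d).getD k 0
      = d.getD k 0 + ((l.map key).count k : Int) := by
  induction l generalizing d with
  | nil => simp
  | cons x xs ih =>
      simp only [List.foldl_cons, ih, List.map_cons, List.count_cons]
      rw [PySem.Dict.getD_insert]
      by_cases h : k = key x
      · subst h
        rw [if_pos rfl]
        push_cast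
        simp
        ring
      · rw [if_neg h]
        have hb : (key x == k) = false := by
          simp only [beq_eq_false_iff_ne, ne_eq]
          exact fun e => h e.symm
        simp [hb]

-- A's counting fold at key k is the same count.
theorem countfold {γ : Type} (key : γ → Option String) (k : Option String) (l : List γ) (acc : Int) :
    l.foldl (fun acc x => if key x = k then acc + 1 else acc) acc
      = acc + ((l.map key).count k : Int) := by
  induction l generalizing acc with
  | nil => simp
  | cons x xs ih =>
      simp only [List.foldl_cons, ih, List.map_cons, List.count_cons]
      by_cases h : key x = k
      · simp [h]; ring
      · have : ¬ (key x == k) = true := by simpa [beq_iff_eq] using h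
        simp [h, this]

-- ===== VERDICT (by name: the statement is the Claim_ definition above) =====
theorem parse_drc_metrics_spec : Claim_equal_parse_drc_metrics := by
  intro report _
  show parse_drc_metrics report = parse_drc_metrics_alt report
  unfold parse_drc_metrics parse_drc_metrics_alt
  simp only [tally_getD (fun v => (PySem.Dict.mk v).get? "severity"),
    countfold (fun v => (PySem.Dict.mk v).get? "severity")]
  simp
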